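-- pv_equiv track=rewrite | github.com/JestemStefan/AdventOfCode2020 | 5/5.py | search_missing_ID
-- ===== SOURCE A (Python) =====
-- def search_missing_ID(ID_list):
--
-- 	for i, id in enumerate(ID_list):
-- 		if i == 0:
-- 			pass
--
-- 		else:
--
-- 			if (id - 1) == ID_list[i-1]:
-- 				pass
--
-- 			else:
-- 				return (id - 1)
-- ===== SOURCE B (Python) =====
-- def search_missing_ID(ID_list):
--     # Divide and conquer over index ranges: the first non-consecutive pair in
--     # [lo, hi) is either among pairs (i-1, i) with i <= mid (range [lo, mid+1))
--     # or among pairs with i > mid (range [mid, hi)); search left first.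
--     def first_gap(lo, hi):
--         if hi - lo < 2:
--             return None
--         if hi - lo == 2:
--             return None if ID_list[lo + 1] - 1 == ID_list[lo] else ID_list[lo + 1] - 1
--         mid = (lo + hi) // 2
--         res = first_gap(lo, mid + 1)
--         return res if res is not None else first_gap(mid, hi)
--     return first_gap(0, len(ID_list))
-- ===== Notes on version B (the rewrite author's own statement) =====
-- stated objective: alternative
-- what changed: Replaced A's single left-to-right enumerate scan with index lookups by a recursive divide-and-conquer over index ranges: split at the midpoint, search the left half (including the boundary pair) first, otherwise the right half; correct because the first gap pair lies in exactly one of the two covering subranges and the left one is searched first.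
import Mathlib
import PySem

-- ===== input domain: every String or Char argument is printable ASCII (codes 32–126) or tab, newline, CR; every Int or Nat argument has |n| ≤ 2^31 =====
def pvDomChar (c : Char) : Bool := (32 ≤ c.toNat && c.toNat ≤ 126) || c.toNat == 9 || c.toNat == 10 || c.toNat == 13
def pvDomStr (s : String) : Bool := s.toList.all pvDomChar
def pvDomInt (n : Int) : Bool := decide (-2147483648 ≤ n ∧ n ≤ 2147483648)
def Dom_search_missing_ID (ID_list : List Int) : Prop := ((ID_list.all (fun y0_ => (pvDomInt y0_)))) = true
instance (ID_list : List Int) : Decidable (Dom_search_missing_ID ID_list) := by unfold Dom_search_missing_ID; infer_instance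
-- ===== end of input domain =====

-- B replaces A's linear enumerate scan by a divide-and-conquer recursion over index ranges (alternative decomposition, same cost).

-- ===== PORT A =====
-- A's for-loop with early return over enumerate(ID_list); ID_list[i-1] is PySem.List.pyGet? ('none' = IndexError, unreachable here).
def search_missing_ID_go (full : List Int) : List (Int × Int) → Option Int
  | [] => none
  | (i, id) :: rest =>
    if i == 0 then search_missing_ID_go full rest
    else
      match PySem.List.pyGet? full (i - 1) with
      | some prev => if (id - 1) == prev then search_missing_ID_go full rest else some (id - 1)
      | none => none

def search_missing_ID (ID_list : List Int) : Option Int :=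
  search_missing_ID_go ID_list (PySem.List.enumerate ID_list)

-- ===== PORT B =====
-- first_gap(lo, hi): the indices lo, hi are the nonnegative ints 0..len, so Nat indexing and
-- Nat division are exact here; ID_list[i] is l[i]? (always in range at every call B makes).
def search_missing_ID_firstGap (l : List Int) (lo hi : Nat) : Option Int :=
  if hi - lo < 2 then none
  else if hi - lo = 2 then
    match l[lo + 1]?, l[lo]? with
    | some c, some p => if c - 1 == p then none else some (c - 1)
    | _, _ => none
  else
    let mid := (lo + hi) / 2
    match search_missing_ID_firstGap l lo (mid + 1) with
    | some r => some r
    | none => search_missing_ID_firstGap l mid hi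
termination_by hi - lo
decreasing_by all_goals omega

def search_missing_ID_alt (ID_list : List Int) : Option Int :=
  search_missing_ID_firstGap ID_list 0 ID_list.length

-- ===== PRECONDITION & SPEC =====
def Spec_search_missing_ID (ID_list : List Int) (out : Option Int) : Prop := out = search_missing_ID_alt ID_list
instance (ID_list : List Int) (out : Option Int) : Decidable (Spec_search_missing_ID ID_list out) := by unfold Spec_search_missing_ID; infer_instance

-- ===== CLAIM (what is proved, stated in full; the proofs are below) =====
def Claim_equal_search_missing_ID : Prop := ∀ (ID_list : List Int), Dom_search_missing_ID ID_list → Spec_search_missing_ID ID_list (search_missing_ID ID_list)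

-- ===== LEMMAS AND PROOFS =====

-- reference left-to-right scan: first element c whose predecessor differs from c - 1
def pvScan (prev : Int) : List Int → Option Int
  | [] => none
  | c :: t => if c - 1 = prev then pvScan c t else some (c - 1)

-- linear recursion on index ranges, intermediate between pvScan and the divide-and-conquer
def pvLin (l : List Int) (lo hi : Nat) : Option Int :=
  if _hiLo : hi - lo < 2 then none
  else
    match l[lo + 1]?, l[lo]? with
    | some c, some p => if c - 1 == p then pvLin l (lo + 1) hi else some (c - 1)
    | _, _ => none
termination_by hi - lo
decreasing_by omega

theorem pvLin_eq (l : List Int) (lo hi : Nat) :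
    pvLin l lo hi = if _h : hi - lo < 2 then none
      else
        match l[lo + 1]?, l[lo]? with
        | some c, some p => if c - 1 == p then pvLin l (lo + 1) hi else some (c - 1)
        | _, _ => none := by
  rw [pvLin]

theorem pvLin_split (l : List Int) :
    ∀ k lo mid hi, mid - lo ≤ k → lo ≤ mid → mid < hi →
      pvLin l lo hi = (pvLin l lo (mid + 1)).or (pvLin l mid hi) := by
  intro k
  induction k with
  | zero =>
    intro lo mid hi hk h1 h2
    have hm : mid = lo := by omega
    subst hm
    have hb : pvLin l mid (mid + 1) = none := by
      rw [pvLin_eq]; simp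
    rw [hb]
    cases pvLin l mid hi <;> simp [Option.or]
  | succ k ih =>
    intro lo mid hi hk h1 h2
    by_cases hml : mid = lo
    · subst hml
      have hb : pvLin l mid (mid + 1) = none := by
        rw [pvLin_eq]; simp
      rw [hb]
      cases pvLin l mid hi <;> simp [Option.or]
    · rw [pvLin_eq l lo hi, pvLin_eq l lo (mid + 1)]
      simp only [show ¬ (hi - lo < 2) by omega, show ¬ (mid + 1 - lo < 2) by omega,
        dif_neg, not_false_eq_true]
      match hc : l[lo + 1]?, hp : l[lo]? with
      | some c, some p =>
        by_cases he : c - 1 = p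
        · simp only [he, beq_self_eq_true, if_true]
          exact ih (lo + 1) mid hi (by omega) (by omega) h2
        · simp [show ((c - 1) == p) = false by simpa using he, Option.or]
      | some c, none =>
        obtain ⟨hx, -⟩ := List.getElem?_eq_some_iff.mp hc
        have hy : l.length ≤ lo := List.getElem?_eq_none_iff.mp hp
        omega
      | none, _ =>
        have hx : l.length ≤ lo + 1 := List.getElem?_eq_none_iff.mp hc
        have hn : l[mid + 1]? = none := List.getElem?_eq_none_iff.mpr (by omega)
        have hz : pvLin l mid hi = none := by
          rw [pvLin_eq l mid hi]
          split
          · rfl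
          · simp [hn]
        rw [hz]
        simp [Option.or]

theorem firstGap_eq_pvLin (l : List Int) :
    ∀ n lo hi, hi - lo ≤ n → search_missing_ID_firstGap l lo hi = pvLin l lo hi := by
  intro n
  induction n with
  | zero =>
    intro lo hi h
    rw [search_missing_ID_firstGap, pvLin]
    simp [show hi - lo < 2 by omega]
  | succ n ih =>
    intro lo hi h
    by_cases h2 : hi - lo < 2
    · rw [search_missing_ID_firstGap, pvLin]; simp [h2]
    · by_cases h3 : hi - lo = 2
      · rw [search_missing_ID_firstGap, pvLin]
        simp only [h3, if_true]
        match l[lo + 1]?, l[lo]? with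
        | some c, some p =>
          by_cases he : c - 1 = p
          · simp only [he, beq_self_eq_true, if_true]
            rw [pvLin]
            simp [show hi - (lo + 1) < 2 by omega]
          · simp [show ((c - 1) == p) = false by simpa using he]
        | some c, none => rfl
        | none, _ => rfl
      · rw [search_missing_ID_firstGap]
        simp only [h2, if_false, h3]
        have e1 := ih lo ((lo + hi) / 2 + 1) (by omega)
        have e2 := ih ((lo + hi) / 2) hi (by omega)
        rw [e1, e2,
          pvLin_split l ((lo + hi) / 2 - lo) lo ((lo + hi) / 2) hi (by omega) (by omega) (by omega)]
        cases pvLin l lo ((lo + hi) / 2 + 1) <;> simp [Option.or]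

theorem pvLin_eq_scan (t : List Int) :
    ∀ (pre : List Int) (prev : Int),
      pvLin (pre ++ prev :: t) pre.length (pre ++ prev :: t).length = pvScan prev t := by
  induction t with
  | nil =>
    intro pre prev
    rw [pvLin]
    simp [pvScan]
  | cons c t ih =>
    intro pre prev
    rw [pvLin]
    have hc : (pre ++ prev :: c :: t)[pre.length + 1]? = some c := by
      rw [List.getElem?_append_right (by omega)]
      simp
    have hp : (pre ++ prev :: c :: t)[pre.length]? = some prev := by
      rw [List.getElem?_append_right (by omega)]
      simp
    simp only [hc, hp, List.length_append, List.length_cons,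
      show ¬ (pre.length + (t.length + 1 + 1) - pre.length < 2) by omega, dif_neg,
      not_false_eq_true]
    by_cases he : c - 1 = prev
    · simp only [he, beq_self_eq_true, if_true, pvScan]
      have := ih (pre ++ [prev]) c
      simpa using this
    · simp [pvScan, he, show ((c - 1) == prev) = false by simpa using he]

theorem pvA_eq_scan (t : List Int) (pre : List Int) (prev : Int) :
    search_missing_ID_go (pre ++ prev :: t)
      (PySem.List.enumerate t ((pre.length : Int) + 1)) = pvScan prev t := by
  induction t generalizing pre prev with
  | nil => simp [PySem.List.enumerate_nil, search_missing_ID_go, pvScan]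
  | cons c t ih =>
    rw [PySem.List.enumerate_cons]
    have h0 : (((pre.length : Int) + 1) == 0) = false := by simp; omega
    have hget : PySem.List.pyGet? (pre ++ prev :: c :: t) ((pre.length : Int) + 1 - 1)
        = some prev := by
      have he : (pre.length : Int) + 1 - 1 = ((pre.length : Nat) : Int) := by omega
      rw [he, PySem.List.pyGet?_natCast]
      simp
    simp only [search_missing_ID_go, h0, Bool.false_eq_true, if_false, hget]
    by_cases h : c - 1 = prev
    · have hl : pre ++ prev :: c :: t = (pre ++ [prev]) ++ c :: t := by simp
      have hs : (pre.length : Int) + 1 + 1 = (((pre ++ [prev]).length : Nat) : Int) + 1 := by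
        simp
      rw [hl, hs] at *
      simp only [h, beq_self_eq_true, if_true, pvScan]
      exact ih (pre ++ [prev]) c
    · have hb : ((c - 1) == prev) = false := by simpa using h
      simp [hb, pvScan, h]

-- ===== VERDICT (by name: the statement is the Claim_ definition above) =====
theorem search_missing_ID_spec : Claim_equal_search_missing_ID := by
  intro l _
  unfold Spec_search_missing_ID search_missing_ID search_missing_ID_alt
  cases l with
  | nil =>
    rw [search_missing_ID_firstGap]
    simp [search_missing_ID_go, PySem.List.enumerate_nil]
  | cons h t =>
    rw [firstGap_eq_pvLin (h :: t) (h :: t).length 0 (h :: t).length (le_refl _)]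
    rw [show (0 : Nat) = ([] : List Int).length from rfl,
      show h :: t = ([] : List Int) ++ h :: t from rfl, pvLin_eq_scan]
    rw [show ([] : List Int) ++ h :: t = h :: t from rfl]
    rw [show PySem.List.enumerate (h :: t) = (0, h) :: PySem.List.enumerate t 1 from
      PySem.List.enumerate_cons ..]
    simp only [search_missing_ID_go, beq_self_eq_true, if_true]
    simpa using pvA_eq_scan t [] h
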